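-- pv_equiv track=rewrite | github.com/4rjunc/CollegeLab | 7thSemLab/SCT/Fuzzy Set Operations/minmax.py | min_max_composition
-- ===== SOURCE A (Python) =====
-- def min_max_composition(R, S):
--     result = set()
--     for (a, b) in R:
--         max_val = float('-inf')  # Initializing with negative infinity
--         for (c, d) in S:
--             if b == c:
--                 max_val = max(max_val, max(a, d))
--         if max_val != float('-inf'):
--             result.add((a, max_val))
--     return result
-- ===== SOURCE B (Python) =====
-- def min_max_composition(R, S):
--     # Index S once: best[c] = the maximum second component among pairs with first component c.
--     best = {}
--     for c, d in S:
--         best[c] = max(d, best.get(c, d))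
--     # One lookup per R pair; max over {max(a, d) : (b, d) in S} = max(a, best[b]).
--     return {(a, max(a, best[b])) for (a, b) in R if b in best}
-- ===== Notes on version B (the rewrite author's own statement) =====
-- stated objective: faster
-- what changed: Replaces the nested scan of S for every R-pair by a single indexing pass over S (dict key -> max second component) followed by a set comprehension over R with one O(1) lookup each, using max(a,d) over matches = max(a, max d).
import Mathlib
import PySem

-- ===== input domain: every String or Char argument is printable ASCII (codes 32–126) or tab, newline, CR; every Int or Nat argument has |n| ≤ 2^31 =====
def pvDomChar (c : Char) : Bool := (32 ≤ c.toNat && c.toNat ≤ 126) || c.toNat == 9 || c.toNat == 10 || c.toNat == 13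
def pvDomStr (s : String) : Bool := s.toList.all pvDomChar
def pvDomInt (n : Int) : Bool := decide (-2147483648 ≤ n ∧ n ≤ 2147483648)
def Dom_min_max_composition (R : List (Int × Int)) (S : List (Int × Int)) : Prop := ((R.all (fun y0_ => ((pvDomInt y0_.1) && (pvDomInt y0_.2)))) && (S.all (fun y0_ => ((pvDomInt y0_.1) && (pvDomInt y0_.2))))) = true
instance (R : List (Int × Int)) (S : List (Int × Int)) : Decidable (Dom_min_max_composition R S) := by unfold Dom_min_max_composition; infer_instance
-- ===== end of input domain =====

-- B replaces A's nested scan of S per R-pair by one indexing pass over S (dict: key -> max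
-- second component) and a set comprehension over R with one lookup each; asymptotically
-- faster (O(|R|+|S|) vs O(|R|*|S|)).

-- ===== PORT A =====
-- inner loop over S: max_val is Option Int, none = float('-inf')
def mmcInnerA (a b : Int) (S : List (Int × Int)) (st : Option Int) : Option Int :=
  S.foldl (fun mv cd =>
    if b = cd.1 then
      some (match mv with
            | none => max a cd.2
            | some v => max v (max a cd.2))
    else mv) st

def min_max_composition (R : List (Int × Int)) (S : List (Int × Int)) : List (Int × Int) :=
  R.foldl (fun result ab =>
    match mmcInnerA ab.1 ab.2 S none with
    | none => result                                 -- max_val == float('-inf'): skip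
    | some v => PySem.Set.add result (ab.1, v)) PySem.Set.empty

-- ===== PORT B =====
-- indexing pass over S:  best[c] = max(d, best.get(c, d))
def mmcBest (S : List (Int × Int)) : PySem.Dict Int Int :=
  S.foldl (fun d cd => d.insert cd.1 (max cd.2 (d.getD cd.1 cd.2))) PySem.Dict.empty

-- set comprehension {(a, max(a, best[b])) for (a, b) in R if b in best}
def min_max_composition_alt (R : List (Int × Int)) (S : List (Int × Int)) : List (Int × Int) :=
  PySem.Set.ofList (R.filterMap (fun ab =>
    ((mmcBest S).get? ab.2).map (fun v => (ab.1, max ab.1 v))))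

-- ===== PRECONDITION & SPEC =====
def Spec_min_max_composition (R : List (Int × Int)) (S : List (Int × Int)) (out : List (Int × Int)) : Prop := out = min_max_composition_alt R S
instance (R : List (Int × Int)) (S : List (Int × Int)) (out : List (Int × Int)) : Decidable (Spec_min_max_composition R S out) := by unfold Spec_min_max_composition; infer_instance

-- ===== CLAIM (what is proved, stated in full; the proofs are below) =====
def Claim_equal_min_max_composition : Prop := ∀ (R : List (Int × Int)) (S : List (Int × Int)), Dom_min_max_composition R S → Spec_min_max_composition R S (min_max_composition R S)

-- ===== LEMMAS AND PROOFS =====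

-- abstract maximum-so-far fold over S for key b (proof-only reference function)
def mmcM (b : Int) (S : List (Int × Int)) (o : Option Int) : Option Int :=
  S.foldl (fun o cd =>
    if cd.1 = b then
      some (match o with | none => cd.2 | some v => max v cd.2)
    else o) o

-- the dict built by B answers get? b with the running max of matching d's
theorem mmcBest_get?_aux (S : List (Int × Int)) (d : PySem.Dict Int Int) (b : Int) :
    (S.foldl (fun d cd => d.insert cd.1 (max cd.2 (d.getD cd.1 cd.2))) d).get? b
    = mmcM b S (d.get? b) := by
  induction S generalizing d with
  | nil => rfl
  | cons cd S ih =>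
    simp only [List.foldl_cons, mmcM, ih]
    by_cases h : cd.1 = b
    · subst h
      cases hg : d.get? cd.1 with
      | none =>
        simp [PySem.Dict.get?_insert_self, PySem.Dict.getD_eq_get?_getD, hg]
      | some v =>
        simp [PySem.Dict.get?_insert_self, PySem.Dict.getD_eq_get?_getD, hg, max_comm v cd.2]
    · simp [h, PySem.Dict.get?_insert_of_ne d (max cd.2 (d.getD cd.1 cd.2)) (fun e => h e.symm)]

theorem mmcBest_get? (S : List (Int × Int)) (b : Int) :
    (mmcBest S).get? b = mmcM b S none := by
  simpa [mmcBest] using mmcBest_get?_aux S PySem.Dict.empty b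

-- A's inner loop is the abstract max fold, post-composed with (max a ·)
theorem mmcInnerA_eq (a b : Int) (S : List (Int × Int)) (o : Option Int) :
    mmcInnerA a b S (o.map (fun v => max a v)) = (mmcM b S o).map (fun v => max a v) := by
  induction S generalizing o with
  | nil => rfl
  | cons cd S ih =>
    simp only [mmcInnerA, mmcM, List.foldl_cons] at *
    by_cases h : cd.1 = b
    · subst h
      cases o with
      | none =>
        have := ih (some cd.2)
        simpa using this
      | some v =>
        have := ih (some (max v cd.2))
        have hmax : max (max a v) (max a cd.2) = max a (max v cd.2) := by omega
        simpa [hmax] using this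
    · have h' : ¬ b = cd.1 := fun e => h e.symm
      simpa [h, h'] using ih o

theorem mmcInnerA_eq_get? (a b : Int) (S : List (Int × Int)) :
    mmcInnerA a b S none = ((mmcBest S).get? b).map (fun v => max a v) := by
  rw [mmcBest_get?]
  simpa using mmcInnerA_eq a b S none

-- fold over a filterMap = fold with an Option-guarded step
theorem foldl_filterMap_match {α β γ : Type} (l : List α) (g : α → Option β)
    (f : γ → β → γ) (init : γ) :
    (l.filterMap g).foldl f init
      = l.foldl (fun acc x => match g x with | none => acc | some y => f acc y) init := by
  induction l generalizing init with
  | nil => rfl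
  | cons x t ih =>
    cases hg : g x <;> simp [hg, ih]

-- ===== VERDICT (by name: the statement is the Claim_ definition above) =====
theorem min_max_composition_spec : Claim_equal_min_max_composition := by
  intro R S _
  show min_max_composition R S = min_max_composition_alt R S
  unfold min_max_composition min_max_composition_alt
  rw [PySem.Set.ofList_eq_foldl,
    foldl_filterMap_match R (fun ab => ((mmcBest S).get? ab.2).map (fun v => (ab.1, max ab.1 v)))
      PySem.Set.add ([] : List (Int × Int))]
  apply PySem.List.foldl_congr_mem
  intro acc ab _
  rw [mmcInnerA_eq_get?]
  cases (mmcBest S).get? ab.2 <;> rfl
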